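-- pv_equiv track=rewrite | github.com/Agrim-Kaushik/Collaborative-Auditing-Blockchain | CAB/GM4/gm.py | select_proposer_by_credit
-- ===== SOURCE A (Python) =====
-- gm_credit_scores = {
--     "GM0": 100,
--     "GM1": 100,
--     "GM2": 100,
--     "GM3": 100,
--     "GM4": 100,
--     "GM5": 100,
--     "GM6": 100
-- }
--
-- def select_proposer_by_credit(sequence_id):
--     """
--     Select proposer based on credit scores - DETERMINISTIC.
--     All GMs will get the same result for the same sequence_id.
--     """
--     # Use sequence_id as deterministic seed
--     seed_value = sequence_id
--
--     # Sort GMs to ensure consistent ordering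
--     sorted_gms = sorted(gm_credit_scores.keys())
--
--     # Create cumulative credit ranges
--     total_credit = sum(gm_credit_scores.values())
--     cumulative = []
--     current = 0
--     for gm_id in sorted_gms:
--         current += gm_credit_scores[gm_id]
--         cumulative.append((gm_id, current))
--
--     # Use sequence_id to deterministically select within credit range
--     deterministic_value = seed_value % total_credit
--
--     for gm_id, threshold in cumulative:
--         if deterministic_value < threshold:
--             return gm_id
--
--     return sorted_gms[0]  # Fallback
-- ===== SOURCE B (Python) =====
-- gm_credit_scores = {
--     "GM0": 100,
--     "GM1": 100,
--     "GM2": 100,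
--     "GM3": 100,
--     "GM4": 100,
--     "GM5": 100,
--     "GM6": 100
-- }
--
-- def select_proposer_by_credit(sequence_id):
--     """Deterministic proposer selection: binary search over cumulative credit thresholds."""
--     sorted_gms = sorted(gm_credit_scores.keys())
--     thresholds = []
--     total = 0
--     for gm_id in sorted_gms:
--         total += gm_credit_scores[gm_id]
--         thresholds.append(total)
--     d = sequence_id % total
--     # bisect_right(thresholds, d), hand-written (no extra imports)
--     lo, hi = 0, len(thresholds)
--     while lo < hi:
--         mid = (lo + hi) // 2
--         if thresholds[mid] <= d:
--             lo = mid + 1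
--         else:
--             hi = mid
--     # d < total = thresholds[-1], so lo is always a valid index
--     return sorted_gms[lo]
-- ===== Notes on version B (the rewrite author's own statement) =====
-- stated objective: alternative
-- what changed: The final linear scan over the cumulative (gm_id, threshold) pairs is replaced by a hand-written bisect_right binary search over a plain thresholds list, and the unreachable fallback return is dropped.
import Mathlib
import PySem

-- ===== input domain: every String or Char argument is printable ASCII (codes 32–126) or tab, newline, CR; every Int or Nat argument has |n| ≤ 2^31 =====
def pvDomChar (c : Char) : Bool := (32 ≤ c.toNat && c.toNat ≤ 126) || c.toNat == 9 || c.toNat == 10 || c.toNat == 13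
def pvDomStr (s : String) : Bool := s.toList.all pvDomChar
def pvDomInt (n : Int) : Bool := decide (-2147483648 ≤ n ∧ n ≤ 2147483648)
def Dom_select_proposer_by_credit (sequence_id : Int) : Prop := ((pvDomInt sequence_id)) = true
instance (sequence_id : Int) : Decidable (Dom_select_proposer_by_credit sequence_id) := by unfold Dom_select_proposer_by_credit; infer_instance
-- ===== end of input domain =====

-- B replaces A's linear scan over cumulative (gm_id, threshold) pairs by a bisect_right
-- binary search over a thresholds list (objective: alternative algorithm, same observable value).

-- ===== PORT A =====
def gm_credit_scores : PySem.Dict String Int :=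
  PySem.Dict.ofList [("GM0", 100), ("GM1", 100), ("GM2", 100), ("GM3", 100),
                     ("GM4", 100), ("GM5", 100), ("GM6", 100)]

-- the 'for gm_id, threshold in cumulative: if deterministic_value < threshold: return gm_id' loop
def pvScanA (cumulative : List (String × Int)) (deterministic_value : Int) : Option String :=
  match cumulative with
  | [] => none
  | (gm_id, threshold) :: rest =>
    if deterministic_value < threshold then some gm_id
    else pvScanA rest deterministic_value

def select_proposer_by_credit (sequence_id : Int) : String :=
  let seed_value := sequence_id
  let sorted_gms := PySem.List.sorted gm_credit_scores.keys (fun x => x) false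
  let total_credit := gm_credit_scores.values.sum
  let cumulative :=
    (sorted_gms.foldl
      (fun (st : Int × List (String × Int)) gm_id =>
        let current := st.1 + (gm_credit_scores.get? gm_id).getD 0   -- key always present
        (current, st.2 ++ [(gm_id, current)]))
      (0, [])).2
  let deterministic_value := PySem.Int.mod seed_value total_credit
  match pvScanA cumulative deterministic_value with
  | some gm_id => gm_id
  | none => (PySem.List.pyGet? sorted_gms 0).getD ""   -- fallback (unreachable; sorted_gms nonempty)

-- ===== PORT B =====
-- the hand-written bisect_right while-loop of Source B (terminates since hi - lo shrinks)
def pvBisect (thresholds : List Int) (d : Int) (lo hi : Nat) : Nat :=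
  if lo < hi then
    let mid := (lo + hi) / 2
    if (PySem.List.pyGet? thresholds (mid : Int)).getD 0 ≤ d then
      pvBisect thresholds d (mid + 1) hi
    else
      pvBisect thresholds d lo mid
  else lo
termination_by hi - lo
decreasing_by all_goals omega

def select_proposer_by_credit_alt (sequence_id : Int) : String :=
  let sorted_gms := PySem.List.sorted gm_credit_scores.keys (fun x => x) false
  let st := sorted_gms.foldl
    (fun (st : Int × List Int) gm_id =>
      let total := st.1 + (gm_credit_scores.get? gm_id).getD 0
      (total, st.2 ++ [total]))
    (0, [])
  let total := st.1
  let thresholds := st.2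
  let d := PySem.Int.mod sequence_id total
  let lo := pvBisect thresholds d 0 thresholds.length
  (PySem.List.pyGet? sorted_gms (lo : Int)).getD ""   -- d < total, so lo is a valid index

-- ===== PRECONDITION & SPEC =====
def Spec_select_proposer_by_credit (sequence_id : Int) (out : String) : Prop := out = select_proposer_by_credit_alt sequence_id
instance (sequence_id : Int) (out : String) : Decidable (Spec_select_proposer_by_credit sequence_id out) := by unfold Spec_select_proposer_by_credit; infer_instance

-- ===== CLAIM (what is proved, stated in full; the proofs are below) =====
def Claim_equal_select_proposer_by_credit : Prop := ∀ (sequence_id : Int), Dom_select_proposer_by_credit sequence_id → Spec_select_proposer_by_credit sequence_id (select_proposer_by_credit sequence_id)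

-- ===== LEMMAS AND PROOFS =====

-- the concrete module constants, evaluated once
def pvGms : List String := ["GM0", "GM1", "GM2", "GM3", "GM4", "GM5", "GM6"]
def pvCum : List (String × Int) :=
  [("GM0", 100), ("GM1", 200), ("GM2", 300), ("GM3", 400), ("GM4", 500), ("GM5", 600), ("GM6", 700)]
def pvThr : List Int := [100, 200, 300, 400, 500, 600, 700]

lemma pv_sorted : PySem.List.sorted gm_credit_scores.keys (fun x => x) false = pvGms := by
  rw [show gm_credit_scores.keys = pvGms from rfl]
  apply PySem.List.sorted_eq_self_of_pairwise
  simp [pvGms]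
  decide

-- with the concrete module constants folded in, A is a function of d = sequence_id % 700
lemma pvA_eq (s : Int) :
    select_proposer_by_credit s =
      (match pvScanA pvCum (PySem.Int.mod s 700) with
       | some gm_id => gm_id
       | none => (PySem.List.pyGet? pvGms 0).getD "") := by
  unfold select_proposer_by_credit
  simp only [pv_sorted]
  rfl

-- likewise B
lemma pvB_eq (s : Int) :
    select_proposer_by_credit_alt s =
      (PySem.List.pyGet? pvGms ((pvBisect pvThr (PySem.Int.mod s 700) 0 7 : Nat) : Int)).getD "" := by
  unfold select_proposer_by_credit_alt
  simp only [pv_sorted]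
  rfl

-- one binary-search step at each node of the (concrete) search tree
lemma pvN07 (d : Int) : pvBisect pvThr d 0 7 =
    if 400 ≤ d then pvBisect pvThr d 4 7 else pvBisect pvThr d 0 3 := by
  rw [pvBisect.eq_1]; rfl
lemma pvN47 (d : Int) : pvBisect pvThr d 4 7 =
    if 600 ≤ d then pvBisect pvThr d 6 7 else pvBisect pvThr d 4 5 := by
  rw [pvBisect.eq_1]; rfl
lemma pvN03 (d : Int) : pvBisect pvThr d 0 3 =
    if 200 ≤ d then pvBisect pvThr d 2 3 else pvBisect pvThr d 0 1 := by
  rw [pvBisect.eq_1]; rfl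
lemma pvN67 (d : Int) : pvBisect pvThr d 6 7 =
    if 700 ≤ d then pvBisect pvThr d 7 7 else pvBisect pvThr d 6 6 := by
  rw [pvBisect.eq_1]; rfl
lemma pvN45 (d : Int) : pvBisect pvThr d 4 5 =
    if 500 ≤ d then pvBisect pvThr d 5 5 else pvBisect pvThr d 4 4 := by
  rw [pvBisect.eq_1]; rfl
lemma pvN23 (d : Int) : pvBisect pvThr d 2 3 =
    if 300 ≤ d then pvBisect pvThr d 3 3 else pvBisect pvThr d 2 2 := by
  rw [pvBisect.eq_1]; rfl
lemma pvN01 (d : Int) : pvBisect pvThr d 0 1 =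
    if 100 ≤ d then pvBisect pvThr d 1 1 else pvBisect pvThr d 0 0 := by
  rw [pvBisect.eq_1]; rfl
lemma pvLeaf (ts : List Int) (d : Int) (k : Nat) : pvBisect ts d k k = k := by
  rw [pvBisect.eq_1]; simp

-- the full evaluation of the binary search on the concrete thresholds
lemma pvB_eval (d : Int) : (pvBisect pvThr d 0 7 : Nat) =
    if 400 ≤ d then (if 600 ≤ d then (if 700 ≤ d then 7 else 6) else (if 500 ≤ d then 5 else 4))
    else (if 200 ≤ d then (if 300 ≤ d then 3 else 2) else (if 100 ≤ d then 1 else 0)) := by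
  rw [pvN07, pvN47, pvN03, pvN67, pvN45, pvN23, pvN01,
      pvLeaf, pvLeaf, pvLeaf, pvLeaf, pvLeaf, pvLeaf, pvLeaf, pvLeaf]

-- the linear scan and the binary search pick the same GM for every residue d
lemma pv_main (d : Int) (h0 : 0 ≤ d) (h7 : d < 700) :
    (match pvScanA pvCum d with
     | some gm_id => gm_id
     | none => (PySem.List.pyGet? pvGms 0).getD "") =
      (PySem.List.pyGet? pvGms ((pvBisect pvThr d 0 7 : Nat) : Int)).getD "" := by
  rw [pvB_eval]
  simp only [pvScanA, pvCum]
  split_ifs <;> first | rfl | omega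

-- ===== VERDICT (by name: the statement is the Claim_ definition above) =====
theorem select_proposer_by_credit_spec : Claim_equal_select_proposer_by_credit := by
  intro s _
  unfold Spec_select_proposer_by_credit
  rw [pvA_eq, pvB_eq]
  have hm : PySem.Int.mod s 700 = s % 700 :=
    PySem.Int.mod_eq_emod_of_pos (a := s) (b := 700) (by norm_num)
  refine pv_main _ ?_ ?_
  · rw [hm]; exact Int.emod_nonneg s (by norm_num)
  · rw [hm]; exact Int.emod_lt_of_pos s (by norm_num)
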